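-- pv_equiv track=rewrite | github.com/Traffic-X/Open-TransMind | track2/data/samplers/clsaware_reader.py | _classaware_sampler
-- ===== SOURCE A (Python) =====
-- def _classaware_sampler(roidbs):
--     category_imgids = {}
--     for i, roidb in enumerate(roidbs):
--         label = roidb[1] # label
--         if label not in category_imgids:
--             category_imgids[label] = []
--         category_imgids[label].append(i)  # 每个类别对应的图片id
--
--     return category_imgids
-- ===== SOURCE B (Python) =====
-- def _classaware_sampler(roidbs):
--     # Two-pass decomposition: first the distinct labels in first-occurrence
--     # order, then one comprehension collecting the indices of each label.
--     labels = list(dict.fromkeys(r[1] for r in roidbs))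
--     return {lab: [i for i, r in enumerate(roidbs) if r[1] == lab]
--             for lab in labels}
-- ===== Notes on version B (the rewrite author's own statement) =====
-- stated objective: alternative
-- what changed: Replaces the single dict-building loop (membership test + in-place append per element) with a two-pass decomposition: dedup the labels once, then a dict comprehension that collects each label's indices with a scan per label.
import Mathlib
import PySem

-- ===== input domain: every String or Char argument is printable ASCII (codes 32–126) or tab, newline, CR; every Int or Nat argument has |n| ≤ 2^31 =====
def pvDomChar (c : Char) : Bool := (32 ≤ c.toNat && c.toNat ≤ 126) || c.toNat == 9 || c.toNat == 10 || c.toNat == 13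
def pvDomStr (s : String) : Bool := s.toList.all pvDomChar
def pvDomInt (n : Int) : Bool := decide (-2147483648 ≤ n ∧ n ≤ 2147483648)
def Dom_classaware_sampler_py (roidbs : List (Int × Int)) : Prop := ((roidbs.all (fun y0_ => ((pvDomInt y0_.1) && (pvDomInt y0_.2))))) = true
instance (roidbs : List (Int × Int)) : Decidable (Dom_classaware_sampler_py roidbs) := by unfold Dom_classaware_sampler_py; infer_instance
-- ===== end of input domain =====

-- B replaces A's single dict-building loop by a two-pass decomposition (dedup the
-- labels, then collect each label's indices by a scan per label); objective: alternative.

-- ===== PORT A =====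
-- one dict-building loop: membership test, optional [] insert, append of the index
def classaware_sampler_py (roidbs : List (Int × Int)) : List (Int × List Int) :=
  ((PySem.List.enumerate roidbs).foldl
    (fun (d : PySem.Dict Int (List Int)) p =>
      let label := p.2.2
      let d := if d.contains label then d else d.insert label []
      d.modify label [] (fun xs => xs ++ [p.1]))
    PySem.Dict.empty).items

-- ===== PORT B =====
-- labels = list(dict.fromkeys(...)); then a comprehension per label
def classaware_sampler_py_alt (roidbs : List (Int × Int)) : List (Int × List Int) :=
  let labels := PySem.List.dedup (roidbs.map (fun r => r.2))
  labels.map (fun lab =>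
    (lab, ((PySem.List.enumerate roidbs).filter (fun p => p.2.2 == lab)).map (fun p => p.1)))

-- ===== PRECONDITION & SPEC =====
def Spec_classaware_sampler_py (roidbs : List (Int × Int)) (out : List (Int × List Int)) : Prop := out = classaware_sampler_py_alt roidbs
instance (roidbs : List (Int × Int)) (out : List (Int × List Int)) : Decidable (Spec_classaware_sampler_py roidbs out) := by unfold Spec_classaware_sampler_py; infer_instance

-- ===== CLAIM (what is proved, stated in full; the proofs are below) =====
def Claim_equal_classaware_sampler_py : Prop := ∀ (roidbs : List (Int × Int)), Dom_classaware_sampler_py roidbs → Spec_classaware_sampler_py roidbs (classaware_sampler_py roidbs)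

-- ===== LEMMAS AND PROOFS =====

-- A's loop body ('if label not in d: d[label] = []' then append) is exactly a modify.
theorem step_eq_modify (d : PySem.Dict Int (List Int)) (p : Int × (Int × Int)) :
    (let label := p.2.2
     let d' := if d.contains label then d else d.insert label []
     d'.modify label [] (fun xs => xs ++ [p.1]))
    = d.modify p.2.2 [] (fun xs => xs ++ [p.1]) := by
  by_cases h : d.contains p.2.2
  · simp [h]
  · simp only [Bool.not_eq_true] at h
    simp only [h, Bool.false_eq_true, if_false, PySem.Dict.modify,
      PySem.Dict.getD_insert_self, PySem.Dict.insert_insert_self]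
    rw [PySem.Dict.getD_of_not_contains d _ h]

theorem sampler_foldl_eq (roidbs : List (Int × Int)) :
    (PySem.List.enumerate roidbs).foldl
      (fun (d : PySem.Dict Int (List Int)) p =>
        let label := p.2.2
        let d := if d.contains label then d else d.insert label []
        d.modify label [] (fun xs => xs ++ [p.1]))
      PySem.Dict.empty
    = ((PySem.List.enumerate roidbs).map (fun p => (p.2.2, p.1))).foldl
        (fun (d : PySem.Dict Int (List Int)) q => d.modify q.1 [] (fun xs => xs ++ [q.2]))
        PySem.Dict.empty := by
  rw [List.foldl_map]
  exact PySem.List.foldl_congr_mem _ _ _ _ (fun d p _ => step_eq_modify d p)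

-- ===== VERDICT (by name: the statement is the Claim_ definition above) =====
theorem classaware_sampler_py_spec : Claim_equal_classaware_sampler_py := by
  intro roidbs _
  unfold Spec_classaware_sampler_py classaware_sampler_py classaware_sampler_py_alt
  rw [sampler_foldl_eq]
  set pairs := (PySem.List.enumerate roidbs).map (fun p => (p.2.2, p.1)) with hpairs
  have hkeys : (pairs.foldl
      (fun (d : PySem.Dict Int (List Int)) q => d.modify q.1 [] (fun xs => xs ++ [q.2]))
      PySem.Dict.empty).keys = PySem.Set.ofList (roidbs.map (fun r => r.2)) := by
    have h1 := PySem.Dict.keys_foldl_modify_key pairs (fun q => q.1) ([] : List Int)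
      (fun _ q xs => xs ++ [q.2]) PySem.Dict.empty
    have h2 : ∀ (s : Int) (l : List (Int × Int)),
        List.map (fun x => x.2.2) (PySem.List.enumerate l s) = List.map (fun r => r.2) l := by
      intro s l
      induction l generalizing s with
      | nil => simp [PySem.List.enumerate_nil]
      | cons a t ih => simp [PySem.List.enumerate_cons, ih]
    simpa [hpairs, List.map_map, Function.comp_def, PySem.Dict.keys_empty, h2 0] using h1
  have hnd : (pairs.foldl
      (fun (d : PySem.Dict Int (List Int)) q => d.modify q.1 [] (fun xs => xs ++ [q.2]))
      PySem.Dict.empty).keys.Nodup := by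
    exact PySem.Dict.nodup_keys_foldl_modify_key pairs (fun q => q.1) ([] : List Int)
      (fun _ q xs => xs ++ [q.2]) PySem.Dict.empty (by simp)
  rw [PySem.Dict.items_eq_map_keys _ hnd [], hkeys]
  simp only [PySem.List.dedup_eq_ofList]
  apply List.map_congr_left
  intro lab _
  rw [PySem.Dict.getD_foldl_modify_append]
  simp [hpairs, List.filter_map, Function.comp_def]
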